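-- pv_equiv track=rewrite | github.com/GLion31023/LeetCode | daily/nov_24/max_xor_for_each_query.py | get_max_xor
-- ===== SOURCE A (Python) =====
-- def get_max_xor(nums: list[int], maximumBit: int) -> list[int]:
--     xor = 0
--
--     for n in nums:
--         xor ^= n
--
--     mask = (1 << maximumBit) - 1
--     answer = []
--     for n in reversed(nums):
--         answer.append(xor ^ mask)
--         xor ^= n
--
--     return answer
-- ===== SOURCE B (Python) =====
-- def get_max_xor(nums: list[int], maximumBit: int) -> list[int]:
--     mask = (1 << maximumBit) - 1
--     answer = [0] * len(nums)
--     last = len(nums) - 1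
--     cur = 0
--     for i, x in enumerate(nums):
--         cur ^= x
--         answer[last - i] = cur ^ mask
--     return answer
-- ===== Notes on version B (the rewrite author's own statement) =====
-- stated objective: alternative
-- what changed: Instead of computing the total XOR and then peeling elements off the back while appending to a growing list, B makes a single forward pass that writes each running prefix-XOR (masked) directly into a preallocated output array at the mirrored index, with no total XOR, no reversed iteration and no appends.
import Mathlib
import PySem

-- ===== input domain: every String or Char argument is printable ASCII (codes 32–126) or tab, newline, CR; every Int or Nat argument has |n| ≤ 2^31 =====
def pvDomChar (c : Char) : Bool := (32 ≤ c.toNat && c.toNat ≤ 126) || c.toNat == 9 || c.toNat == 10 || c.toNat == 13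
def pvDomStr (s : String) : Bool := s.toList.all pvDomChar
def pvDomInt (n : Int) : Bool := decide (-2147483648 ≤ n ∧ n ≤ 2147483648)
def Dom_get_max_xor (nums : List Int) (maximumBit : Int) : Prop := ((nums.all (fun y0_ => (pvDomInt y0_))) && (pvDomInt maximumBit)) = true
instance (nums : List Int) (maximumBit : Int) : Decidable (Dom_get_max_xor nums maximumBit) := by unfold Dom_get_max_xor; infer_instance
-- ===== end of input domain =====

-- B replaces A's total-XOR-then-peel-backwards pass by a single forward pass writing each masked prefix XOR into a preallocated array at the mirrored index (alternative decomposition, same cost).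

-- ===== PORT A =====
-- xor = 0; for n in nums: xor ^= n; mask = (1 << maximumBit) - 1;
-- answer = []; for n in reversed(nums): answer.append(xor ^ mask); xor ^= n
def get_max_xor (nums : List Int) (maximumBit : Int) : List Int :=
  let xor := nums.foldl (fun x n => PySem.Int.bxor x n) 0
  let mask : Int := (1 <<< maximumBit.toNat) - 1
  (nums.reverse.foldl
    (fun (s : Int × List Int) n => (PySem.Int.bxor s.1 n, s.2 ++ [PySem.Int.bxor s.1 mask]))
    (xor, [])).2

-- ===== PORT B =====
-- mask = (1 << maximumBit) - 1; answer = [0]*len(nums); last = len(nums)-1;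
-- cur = 0; for i, x in enumerate(nums): cur ^= x; answer[last - i] = cur ^ mask
def get_max_xor_alt (nums : List Int) (maximumBit : Int) : List Int :=
  let mask : Int := (1 <<< maximumBit.toNat) - 1
  let last : Int := (nums.length : Int) - 1
  ((PySem.List.enumerate nums 0).foldl
    (fun (s : Int × List Int) p =>
      let cur := PySem.Int.bxor s.1 p.2
      (cur, PySem.List.pySetD s.2 (last - p.1) (PySem.Int.bxor cur mask)))
    (0, List.replicate nums.length 0)).2

-- ===== PRECONDITION & SPEC =====
-- Pre_ excludes negative maximumBit, where Python's '1 << maximumBit' raises ValueError.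
def Pre_get_max_xor (nums : List Int) (maximumBit : Int) : Prop := 0 ≤ maximumBit
instance (nums : List Int) (maximumBit : Int) : Decidable (Pre_get_max_xor nums maximumBit) := by unfold Pre_get_max_xor; infer_instance
def pvWitness_get_max_xor : List Int × Int := ([3, 1, 2], 3)

def Spec_get_max_xor (nums : List Int) (maximumBit : Int) (out : List Int) : Prop := out = get_max_xor_alt nums maximumBit
instance (nums : List Int) (maximumBit : Int) (out : List Int) : Decidable (Spec_get_max_xor nums maximumBit out) := by unfold Spec_get_max_xor; infer_instance

-- ===== CLAIM (what is proved, stated in full; the proofs are below) =====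
def Claim_equal_get_max_xor : Prop := ∀ (nums : List Int) (maximumBit : Int), Dom_get_max_xor nums maximumBit → Pre_get_max_xor nums maximumBit → Spec_get_max_xor nums maximumBit (get_max_xor nums maximumBit)

-- ===== LEMMAS AND PROOFS =====

theorem bxor_cancel (a b : Int) : PySem.Int.bxor (PySem.Int.bxor a b) b = a := by
  unfold PySem.Int.bxor
  by_cases ha : 0 ≤ a <;> by_cases hb : 0 ≤ b <;>
    simp only [ha, hb, if_false, if_pos] <;> simp_all <;> try omega

-- the forward prefix-XOR list of nums
def prefAux (c : Int) : List Int → List Int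
  | [] => []
  | n :: t => PySem.Int.bxor c n :: prefAux (PySem.Int.bxor c n) t

-- the answer list A's second loop builds
def loopAux (mask x : Int) : List Int → List Int
  | [] => []
  | n :: t => PySem.Int.bxor x mask :: loopAux mask (PySem.Int.bxor x n) t

theorem foldA_eq (mask : Int) (l : List Int) (x : Int) (acc : List Int) :
    (l.foldl (fun (s : Int × List Int) n => (PySem.Int.bxor s.1 n, s.2 ++ [PySem.Int.bxor s.1 mask])) (x, acc)).2
      = acc ++ loopAux mask x l := by
  induction l generalizing x acc with
  | nil => simp [loopAux]
  | cons n t ih => simp [loopAux, ih]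

theorem loopAux_append (mask x : Int) (a b : List Int) :
    loopAux mask x (a ++ b) = loopAux mask x a ++ loopAux mask (a.foldl (fun x n => PySem.Int.bxor x n) x) b := by
  induction a generalizing x with
  | nil => simp [loopAux]
  | cons n t ih => simp [loopAux, ih]

theorem fold_cancel (l : List Int) (x : Int) :
    l.reverse.foldl (fun x n => PySem.Int.bxor x n) (l.foldl (fun x n => PySem.Int.bxor x n) x) = x := by
  induction l generalizing x with
  | nil => rfl
  | cons n t ih =>
    simp only [List.reverse_cons, List.foldl_append, List.foldl_cons, List.foldl_nil] at *
    rw [ih (PySem.Int.bxor x n), bxor_cancel]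

theorem main_eq (mask : Int) (l : List Int) (c : Int) :
    loopAux mask (l.foldl (fun x n => PySem.Int.bxor x n) c) l.reverse
      = (prefAux c l).reverse.map (fun p => PySem.Int.bxor p mask) := by
  induction l generalizing c with
  | nil => rfl
  | cons n t ih =>
    simp only [List.foldl_cons, List.reverse_cons, loopAux_append, prefAux, List.map_append]
    rw [ih (PySem.Int.bxor c n), fold_cancel t (PySem.Int.bxor c n)]
    simp [loopAux]

-- setting the last zero of the replicate block prepended to acc
theorem set_replicate_last (m : Nat) (v : Int) (acc : List Int) :
    (List.replicate (m + 1) (0 : Int) ++ acc).set m v = List.replicate m (0 : Int) ++ v :: acc := by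
  induction m with
  | zero => simp
  | succ k ih => simpa [List.replicate_succ] using ih

-- invariant of B's single indexed forward pass
theorem foldB_eq (n : Nat) (mask : Int) (l : List Int) (k : Int) (c : Int) (acc : List Int)
    (hk : 0 ≤ k) (hkn : k + l.length = n) :
    ((PySem.List.enumerate l k).foldl
      (fun (s : Int × List Int) p =>
        (PySem.Int.bxor s.1 p.2,
         PySem.List.pySetD s.2 ((n : Int) - 1 - p.1) (PySem.Int.bxor (PySem.Int.bxor s.1 p.2) mask)))
      (c, List.replicate l.length 0 ++ acc)).2
      = (prefAux c l).reverse.map (fun p => PySem.Int.bxor p mask) ++ acc := by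
  induction l generalizing k c acc with
  | nil => simp [PySem.List.enumerate_nil, prefAux]
  | cons x t ih =>
    simp only [PySem.List.enumerate_cons, List.foldl_cons]
    have hidx : (n : Int) - 1 - k = ((t.length : Nat) : Int) := by
      simp only [List.length_cons] at hkn; omega
    rw [hidx, PySem.List.pySetD_natCast]
    have hrep : List.replicate (x :: t).length (0 : Int) ++ acc
        = List.replicate (t.length + 1) (0 : Int) ++ acc := by simp
    rw [hrep, set_replicate_last]
    rw [ih (k + 1) (PySem.Int.bxor c x) (PySem.Int.bxor (PySem.Int.bxor c x) mask :: acc)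
      (by omega) (by simp only [List.length_cons] at hkn; omega)]
    simp [prefAux]

theorem altB_eq (nums : List Int) (mb : Int) :
    get_max_xor_alt nums mb
      = (prefAux 0 nums).reverse.map (fun p => PySem.Int.bxor p ((1 <<< mb.toNat) - 1)) := by
  have h := foldB_eq nums.length ((1 <<< mb.toNat) - 1) nums 0 0 [] le_rfl (by simp)
  simp only [List.append_nil] at h
  exact h

-- ===== VERDICT (by name: the statement is the Claim_ definition above) =====
theorem get_max_xor_spec : Claim_equal_get_max_xor := by
  intro nums maximumBit _ _
  unfold Spec_get_max_xor get_max_xor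
  rw [foldA_eq, altB_eq]
  simpa using main_eq ((1 <<< maximumBit.toNat) - 1) nums 0
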